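-- pv_equiv track=rewrite | github.com/KaranDhillon05/Binary5-dev | ml-service/app/models/ring_detector.py | _ip_subnet_overlap
-- ===== SOURCE A (Python) =====
-- def _ip_subnet_overlap(claim_ids: list[str], subnets: dict[str, str | None]) -> bool:
--     """True if any /24 subnet appears in more than one claim."""
--     seen: dict[str, int] = {}
--     for cid in claim_ids:
--         sn = subnets.get(cid)
--         if sn:
--             seen[sn] = seen.get(sn, 0) + 1
--             if seen[sn] > 1:
--                 return True
--     return False
-- ===== SOURCE B (Python) =====
-- def _ip_subnet_overlap(claim_ids: list[str], subnets: dict[str, str | None]) -> bool: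
--     """True if any /24 subnet appears in more than one claim."""
--     vals = [sn for cid in claim_ids if (sn := subnets.get(cid))]
--     return len(set(vals)) != len(vals)
-- ===== Notes on version B (the rewrite author's own statement) =====
-- stated objective: simpler
-- what changed: Replaces the incremental per-item counter dict with early return by a one-pass collection of truthy subnet values followed by a dedup-cardinality comparison (len(set(vals)) != len(vals)).
import Mathlib
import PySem

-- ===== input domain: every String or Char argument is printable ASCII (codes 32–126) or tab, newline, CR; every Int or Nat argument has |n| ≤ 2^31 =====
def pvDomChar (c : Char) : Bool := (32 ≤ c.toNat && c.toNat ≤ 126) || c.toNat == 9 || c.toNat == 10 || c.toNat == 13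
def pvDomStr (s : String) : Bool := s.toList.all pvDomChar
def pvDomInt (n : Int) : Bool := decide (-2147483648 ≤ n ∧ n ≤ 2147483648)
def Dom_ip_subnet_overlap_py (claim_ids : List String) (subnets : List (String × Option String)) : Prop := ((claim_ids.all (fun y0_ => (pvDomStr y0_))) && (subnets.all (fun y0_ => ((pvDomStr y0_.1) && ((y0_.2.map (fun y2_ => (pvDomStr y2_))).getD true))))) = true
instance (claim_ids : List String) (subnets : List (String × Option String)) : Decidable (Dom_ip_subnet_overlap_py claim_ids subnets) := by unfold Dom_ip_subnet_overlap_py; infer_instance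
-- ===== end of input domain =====

-- B replaces A's per-item counter dict with early return by collect-then-compare-cardinality; objective: simpler.

-- ===== PORT A =====
-- the loop: for cid in claim_ids: sn = subnets.get(cid); if sn: seen[sn] += 1; if seen[sn] > 1: return True
def ipLoopA (d : PySem.Dict String (Option String)) (rest : List String)
    (seen : PySem.Dict String Int) : Bool :=
  match rest with
  | [] => false
  | cid :: rest =>
    match d.getD cid none with
    | some sn =>
      if sn ≠ "" then
        let seen' := seen.insert sn (seen.getD sn 0 + 1)
        if seen'.getD sn 0 > 1 then true else ipLoopA d rest seen'
      else ipLoopA d rest seen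
    | none => ipLoopA d rest seen

def ip_subnet_overlap_py (claim_ids : List String) (subnets : List (String × Option String)) : Bool :=
  ipLoopA (PySem.Dict.ofList subnets) claim_ids PySem.Dict.empty

-- ===== PORT B =====
-- vals = [sn for cid in claim_ids if (sn := subnets.get(cid))]; return len(set(vals)) != len(vals)
def ipVals (d : PySem.Dict String (Option String)) (claim_ids : List String) : List String :=
  claim_ids.filterMap (fun cid =>
    match d.getD cid none with
    | some sn => if sn ≠ "" then some sn else none
    | none => none)

def ip_subnet_overlap_py_alt (claim_ids : List String) (subnets : List (String × Option String)) : Bool :=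
  let vals := ipVals (PySem.Dict.ofList subnets) claim_ids
  decide ((PySem.Set.ofList vals).length ≠ vals.length)

-- ===== PRECONDITION & SPEC =====
def Spec_ip_subnet_overlap_py (claim_ids : List String) (subnets : List (String × Option String)) (out : Bool) : Prop := out = ip_subnet_overlap_py_alt claim_ids subnets
instance (claim_ids : List String) (subnets : List (String × Option String)) (out : Bool) : Decidable (Spec_ip_subnet_overlap_py claim_ids subnets out) := by unfold Spec_ip_subnet_overlap_py; infer_instance

-- ===== CLAIM (what is proved, stated in full; the proofs are below) =====
def Claim_equal_ip_subnet_overlap_py : Prop := ∀ (claim_ids : List String) (subnets : List (String × Option String)), Dom_ip_subnet_overlap_py claim_ids subnets → Spec_ip_subnet_overlap_py claim_ids subnets (ip_subnet_overlap_py claim_ids subnets)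

-- ===== LEMMAS AND PROOFS =====

theorem ipVals_cons_none (d : PySem.Dict String (Option String)) (cid : String)
    (rest : List String) (hd : d.getD cid none = none) :
    ipVals d (cid :: rest) = ipVals d rest := by
  simp [ipVals, hd]

theorem ipVals_cons_empty (d : PySem.Dict String (Option String)) (cid : String)
    (rest : List String) (hd : d.getD cid none = some "") :
    ipVals d (cid :: rest) = ipVals d rest := by
  simp [ipVals, hd]

theorem ipVals_cons_some (d : PySem.Dict String (Option String)) (cid sn : String)
    (rest : List String) (hd : d.getD cid none = some sn) (hsn : sn ≠ "") :
    ipVals d (cid :: rest) = sn :: ipVals d rest := by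
  simp [ipVals, hd, hsn]

-- A's loop returns true iff the collected values contain a duplicate or hit a value already counted in `seen`.
theorem ipLoopA_eq (d : PySem.Dict String (Option String)) (rest : List String) :
    ∀ (seen : PySem.Dict String Int),
    (∀ v, seen.getD v 0 = 0 ∨ 1 ≤ seen.getD v 0) →
    ipLoopA d rest seen =
      (decide ¬ (ipVals d rest).Nodup || (ipVals d rest).any (fun v => decide (1 ≤ seen.getD v 0))) := by
  induction rest with
  | nil => intro seen _; simp [ipLoopA, ipVals]
  | cons cid rest ih =>
    intro seen hinv
    unfold ipLoopA
    cases hd : d.getD cid none with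
    | none =>
      rw [ipVals_cons_none d cid rest hd]
      exact ih seen hinv
    | some sn =>
      by_cases hsn : sn = ""
      · subst hsn
        simp only [ne_eq, not_true_eq_false, if_false]
        rw [ipVals_cons_empty d cid rest hd]
        exact ih seen hinv
      · simp only [ne_eq, hsn, not_false_eq_true, if_true]
        rw [ipVals_cons_some d cid sn rest hd hsn]
        rw [PySem.Dict.getD_insert_self]
        rcases hinv sn with h0 | h1
        · -- not yet seen: count becomes 1, recurse
          rw [if_neg (by omega)]
          have hinv' : ∀ v, (seen.insert sn (seen.getD sn 0 + 1)).getD v 0 = 0 ∨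
              1 ≤ (seen.insert sn (seen.getD sn 0 + 1)).getD v 0 := by
            intro v
            rw [PySem.Dict.getD_insert]
            split_ifs
            · omega
            · exact hinv v
          rw [ih _ hinv']
          have hL : (∃ v ∈ ipVals d rest, 1 ≤ (seen.insert sn (seen.getD sn 0 + 1)).getD v 0) ↔
              (sn ∈ ipVals d rest ∨ ∃ v ∈ ipVals d rest, 1 ≤ seen.getD v 0) := by
            constructor
            · rintro ⟨v, hv, h⟩
              rw [PySem.Dict.getD_insert] at h
              split_ifs at h with hveq
              · exact Or.inl (hveq ▸ hv)
              · exact Or.inr ⟨v, hv, h⟩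
            · rintro (hin | ⟨v, hv, h⟩)
              · refine ⟨sn, hin, ?_⟩
                rw [PySem.Dict.getD_insert, if_pos rfl]
                omega
              · refine ⟨v, hv, ?_⟩
                rw [PySem.Dict.getD_insert]
                split_ifs with hveq
                · omega
                · exact h
          have hsn0 : ¬ (1 ≤ seen.getD sn 0) := by omega
          rw [Bool.eq_iff_iff]
          simp only [Bool.or_eq_true, List.any_eq_true, decide_eq_true_eq, List.nodup_cons,
            List.any_cons, not_and]
          rw [hL]
          by_cases hin : sn ∈ ipVals d rest <;> tauto
        · -- already seen at least once: return True
          rw [if_pos (by omega)]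
          simp [List.any_cons, h1]

-- ofList xs is a permutation of Mathlib's dedup of xs (both Nodup, same members)
theorem ofList_perm_dedup (xs : List String) : (PySem.Set.ofList xs).Perm xs.dedup := by
  rw [List.perm_ext_iff_of_nodup (PySem.Set.nodup_ofList xs) xs.nodup_dedup]
  intro a
  rw [PySem.Set.mem_ofList, List.mem_dedup]

theorem length_ofList_eq_iff (xs : List String) :
    (PySem.Set.ofList xs).length = xs.length ↔ xs.Nodup := by
  rw [(ofList_perm_dedup xs).length_eq]
  constructor
  · intro h
    have hsub : xs.dedup.Sublist xs := xs.dedup_sublist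
    have := hsub.eq_of_length h
    rwa [List.dedup_eq_self] at this
  · intro h
    rw [List.dedup_eq_self.mpr h]

-- ===== VERDICT (by name: the statement is the Claim_ definition above) =====
theorem ip_subnet_overlap_py_spec : Claim_equal_ip_subnet_overlap_py := by
  intro claim_ids subnets _
  unfold Spec_ip_subnet_overlap_py ip_subnet_overlap_py ip_subnet_overlap_py_alt
  rw [ipLoopA_eq _ _ _ (by intro v; left; simp [PySem.Dict.getD_empty])]
  simp only [PySem.Dict.getD_empty]
  simp [length_ofList_eq_iff]
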